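-- pv_equiv track=rewrite | github.com/JacobBolano/cs265_final_project | examples/register_allocation.py | loop_blocks_by_backEdge
-- ===== SOURCE A (Python) =====
-- def loop_blocks_by_backEdge(preds, back_edge_block, header_block):
--     '''
--     Find all blocks that could be executed between a header block and a back edge block
--     Used in loop analysis, assumes that the header block dominates the back edge block as would occur in loops
--     '''
--     reachable_blocks = set()
--     stack = [back_edge_block]
--     visited = set()
--     while stack:
--         # Get the current block
--         current_block = stack.pop()
--         if current_block in visited:
--             continue
--         visited.add(current_block)
--         if current_block == header_block:
--             continue
--         reachable_blocks.add(current_block)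
--         for pred in preds.get(current_block, []):
--             if pred not in visited:
--                 stack.append(pred)
--         # add header to complete loop
--         reachable_blocks.add(header_block)
--     return reachable_blocks
-- ===== SOURCE B (Python) =====
-- def loop_blocks_by_backEdge(preds, back_edge_block, header_block):
--     '''Recursive-DFS re-implementation: walk the predecessor graph backward from
--     the back edge, stopping at the header; the header joins the set as soon as
--     any loop-body block is found.'''
--     visited = set()
--     reachable_blocks = set()
--
--     def visit(block):
--         if block in visited:
--             return
--         visited.add(block)
--         if block == header_block:
--             return
--         reachable_blocks.add(block)
--         reachable_blocks.add(header_block)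
--         # reversed: predecessors are explored most-recently-listed first (LIFO)
--         for pred in reversed(preds.get(block, [])):
--             visit(pred)
--
--     visit(back_edge_block)
--     return reachable_blocks
-- ===== Notes on version B (the rewrite author's own statement) =====
-- stated objective: alternative
-- what changed: Replaces A's explicit-stack while-loop (pop, visited check, push unvisited predecessors) by a recursive depth-first visit function over the predecessor graph; the proof shows the stack loop is exactly the recursive visit folded over the stack.
import Mathlib
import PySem

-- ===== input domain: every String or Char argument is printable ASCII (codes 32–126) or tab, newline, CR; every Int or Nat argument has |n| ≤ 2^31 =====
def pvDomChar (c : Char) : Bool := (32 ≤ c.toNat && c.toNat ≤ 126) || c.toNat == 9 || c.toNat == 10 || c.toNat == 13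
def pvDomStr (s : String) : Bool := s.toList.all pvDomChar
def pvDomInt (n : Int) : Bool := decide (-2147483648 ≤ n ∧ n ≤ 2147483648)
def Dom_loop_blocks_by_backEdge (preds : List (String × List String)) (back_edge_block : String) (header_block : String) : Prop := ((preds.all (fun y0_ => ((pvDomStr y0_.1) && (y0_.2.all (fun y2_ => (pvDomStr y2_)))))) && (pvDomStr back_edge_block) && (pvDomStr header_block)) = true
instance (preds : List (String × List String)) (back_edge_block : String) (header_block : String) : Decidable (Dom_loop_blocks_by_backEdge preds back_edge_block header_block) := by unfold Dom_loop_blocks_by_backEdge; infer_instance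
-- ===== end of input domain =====

-- B replaces A's explicit-stack while-loop by a recursive depth-first visit of
-- the predecessor graph (objective: alternative decomposition, same cost).

-- ===== PORT A =====
-- termination helpers for the while loop (cited by decreasing_by)
theorem lb_mem_getD {d : PySem.Dict String (List String)} {c x : String}
    (hx : x ∈ PySem.Dict.getD d c []) : x ∈ (PySem.Dict.values d).flatten := by
  rw [PySem.Dict.getD_eq_get?_getD] at hx
  cases hget : PySem.Dict.get? d c with
  | none => rw [hget] at hx; simp at hx
  | some v =>
    rw [hget] at hx
    have hitem : (c, v) ∈ d.items := PySem.Dict.mem_items_of_get?_eq_some d hget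
    cases d with
    | mk l =>
      exact List.mem_flatten.mpr ⟨v, by
        simpa [PySem.Dict.values] using List.mem_map_of_mem (f := Prod.snd) hitem, hx⟩

theorem lb_push (cond : String → Bool) : ∀ (ps st : List String),
    ps.foldl (fun st p => if cond p then st else p :: st) st
      = (ps.filter (fun p => !cond p)).reverse ++ st := by
  intro ps
  induction ps with
  | nil => intro st; simp
  | cons p ps ih =>
    intro st
    cases hc : cond p <;>
      simp [List.foldl_cons, hc, ih]

theorem lb_card_sub (W new rest : List String) (c : String) (v : PySem.Set String)
    (hnew : ∀ x ∈ new, x ∈ W ∨ x ∈ rest) :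
    ((W ++ new).toFinset \ v.toFinset) ⊆ ((W ++ (c :: rest)).toFinset \ v.toFinset) := by
  intro x hx
  simp only [Finset.mem_sdiff, List.mem_toFinset, List.mem_append, List.mem_cons] at hx ⊢
  rcases hx with ⟨hx1, hx2⟩
  refine ⟨?_, hx2⟩
  rcases hx1 with h | h
  · exact Or.inl h
  · rcases hnew x h with h' | h'
    · exact Or.inl h'
    · exact Or.inr (Or.inr h')

theorem lb_card_lt (W new rest : List String) (c : String) (v : PySem.Set String)
    (hc : c ∉ v) (hnew : ∀ x ∈ new, x ∈ W ∨ x ∈ rest) :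
    ((W ++ new).toFinset \ (PySem.Set.add v c).toFinset).card
      < ((W ++ (c :: rest)).toFinset \ v.toFinset).card := by
  apply Finset.card_lt_card
  have hsub : ((W ++ new).toFinset \ (PySem.Set.add v c).toFinset)
      ⊆ ((W ++ (c :: rest)).toFinset \ v.toFinset) := by
    intro x hx
    simp only [Finset.mem_sdiff, List.mem_toFinset, List.mem_append, List.mem_cons,
      PySem.Set.mem_add] at hx ⊢
    rcases hx with ⟨hx1, hx2⟩
    refine ⟨?_, fun hxv => hx2 (Or.inl hxv)⟩
    rcases hx1 with h | h
    · exact Or.inl h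
    · rcases hnew x h with h' | h'
      · exact Or.inl h'
      · exact Or.inr (Or.inr h')
  refine (Finset.ssubset_iff_of_subset hsub).mpr ⟨c, ?_, ?_⟩
  · simp only [Finset.mem_sdiff, List.mem_toFinset, List.mem_append, List.mem_cons]
    exact ⟨Or.inr (Or.inl trivial), hc⟩
  · simp [Finset.mem_sdiff, List.mem_toFinset, PySem.Set.mem_add]

-- while-loop core: state = (visited, reachable); Lean list head = Python stack top
-- (stack.append = cons, stack.pop = head), so 'for pred in ps: if pred not in
-- visited: stack.append(pred)' is a foldl pushing with cons.
def lbCoreA (d : PySem.Dict String (List String)) (header : String) :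
    List String → PySem.Set String → PySem.Set String →
    PySem.Set String × PySem.Set String
  | [], visited, reachable => (visited, reachable)
  | c :: rest, visited, reachable =>
    if PySem.Set.contains visited c then
      lbCoreA d header rest visited reachable
    else
      let visited' := PySem.Set.add visited c
      if c = header then
        lbCoreA d header rest visited' reachable
      else
        lbCoreA d header
          ((PySem.Dict.getD d c []).foldl
            (fun st p => if PySem.Set.contains visited' p then st else p :: st) rest)
          visited'
          (PySem.Set.add (PySem.Set.add reachable c) header)
  termination_by stack visited _ =>
    ((((PySem.Dict.values d).flatten ++ stack).toFinset \ visited.toFinset).card,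
      stack.length)
  decreasing_by
    · have hle := Finset.card_le_card
        (lb_card_sub (PySem.Dict.values d).flatten rest rest c visited (fun x hx => Or.inr hx))
      rcases lt_or_eq_of_le hle with h | h
      · exact Prod.Lex.left _ _ h
      · rw [h]; exact Prod.Lex.right _ (by simp)
    · apply Prod.Lex.left
      have hc : c ∉ visited := by
        simp only [← PySem.Set.contains_iff]; assumption
      exact lb_card_lt _ rest rest c visited hc (fun x hx => Or.inr hx)
    · apply Prod.Lex.left
      have hc : c ∉ visited := by
        simp only [← PySem.Set.contains_iff]; assumption
      apply lb_card_lt _ _ rest c visited hc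
      intro x hx
      simp only [dite_eq_ite] at hx
      rw [lb_push (fun p => PySem.Set.contains (PySem.Set.add visited c) p)] at hx
      rcases List.mem_append.mp hx with h | h
      · exact Or.inl (lb_mem_getD (List.mem_of_mem_filter (List.mem_reverse.mp h)))
      · exact Or.inr h
def loop_blocks_by_backEdge (preds : List (String × List String)) (back_edge_block : String) (header_block : String) : List String :=
  (lbCoreA (PySem.Dict.ofList preds) header_block [back_edge_block]
    PySem.Set.empty PySem.Set.empty).2

-- ===== PORT B =====
-- recursive visit; the fuel argument is a totality guard only (the recursion
-- depth is bounded by the number of distinct nodes, proved in the lemmas below)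
def lbVisitB (d : PySem.Dict String (List String)) (header : String) :
    Nat → String → PySem.Set String × PySem.Set String →
    PySem.Set String × PySem.Set String
  | 0, _, σ => σ
  | fuel + 1, b, σ =>
    if PySem.Set.contains σ.1 b then σ
    else
      let visited' := PySem.Set.add σ.1 b
      if b = header then (visited', σ.2)
      else
        ((PySem.Dict.getD d b []).reverse).foldl
          (fun σ p => lbVisitB d header fuel p σ)
          (visited', PySem.Set.add (PySem.Set.add σ.2 b) header)

def loop_blocks_by_backEdge_alt (preds : List (String × List String)) (back_edge_block : String) (header_block : String) : List String :=
  let d := PySem.Dict.ofList preds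
  (lbVisitB d header_block ((PySem.Dict.values d).flatten.length + 2) back_edge_block
    (PySem.Set.empty, PySem.Set.empty)).2

-- ===== PRECONDITION & SPEC =====
def Spec_loop_blocks_by_backEdge (preds : List (String × List String)) (back_edge_block : String) (header_block : String) (out : List String) : Prop := out = loop_blocks_by_backEdge_alt preds back_edge_block header_block
instance (preds : List (String × List String)) (back_edge_block : String) (header_block : String) (out : List String) : Decidable (Spec_loop_blocks_by_backEdge preds back_edge_block header_block out) := by unfold Spec_loop_blocks_by_backEdge; infer_instance

-- ===== CLAIM (what is proved, stated in full; the proofs are below) =====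
def Claim_equal_loop_blocks_by_backEdge : Prop := ∀ (preds : List (String × List String)) (back_edge_block : String) (header_block : String), Dom_loop_blocks_by_backEdge preds back_edge_block header_block → Spec_loop_blocks_by_backEdge preds back_edge_block header_block (loop_blocks_by_backEdge preds back_edge_block header_block)

-- ===== LEMMAS AND PROOFS =====

-- A-side one-step unfolding lemmas
theorem lbA_nil (d : PySem.Dict String (List String)) (h : String) (v r : PySem.Set String) :
    lbCoreA d h [] v r = (v, r) := by rw [lbCoreA]

theorem lbA_skip (d : PySem.Dict String (List String)) (h c : String) (rest : List String)
    (v r : PySem.Set String) (hc : c ∈ v) :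
    lbCoreA d h (c :: rest) v r = lbCoreA d h rest v r := by
  rw [lbCoreA, if_pos ((PySem.Set.contains_iff v c).mpr hc)]

theorem lbA_header (d : PySem.Dict String (List String)) (h : String) (rest : List String)
    (v r : PySem.Set String) (hc : h ∉ v) :
    lbCoreA d h (h :: rest) v r = lbCoreA d h rest (PySem.Set.add v h) r := by
  rw [lbCoreA]
  rw [if_neg (fun ht => hc ((PySem.Set.contains_iff v h).mp ht))]
  simp

theorem lbA_step (d : PySem.Dict String (List String)) (h c : String) (rest : List String)
    (v r : PySem.Set String) (hc : c ∉ v) (hh : c ≠ h) :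
    lbCoreA d h (c :: rest) v r = lbCoreA d h
          (((PySem.Dict.getD d c []).filter
            (fun p => !PySem.Set.contains (PySem.Set.add v c) p)).reverse ++ rest)
          (PySem.Set.add v c)
          (PySem.Set.add (PySem.Set.add r c) h) := by
  rw [lbCoreA]
  rw [if_neg (fun ht => hc ((PySem.Set.contains_iff v c).mp ht))]
  simp only [if_neg hh]
  rw [lb_push (fun p => PySem.Set.contains (PySem.Set.add v c) p)]

-- B-side lemmas
theorem lbB_skip (d : PySem.Dict String (List String)) (hdr : String) (f : Nat) (b : String)
    (σ : PySem.Set String × PySem.Set String) (hb : b ∈ σ.1) : lbVisitB d hdr f b σ = σ := by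
  cases f with
  | zero => rw [lbVisitB]
  | succ f => rw [lbVisitB, if_pos ((PySem.Set.contains_iff σ.1 b).mpr hb)]

theorem lbB_mono (d : PySem.Dict String (List String)) (hdr : String) :
    ∀ (f : Nat) (b : String) (σ : PySem.Set String × PySem.Set String) (x : String),
      x ∈ σ.1 → x ∈ (lbVisitB d hdr f b σ).1 := by
  intro f
  induction f with
  | zero => intro b σ x hx; rw [lbVisitB]; exact hx
  | succ f ih =>
    intro b σ x hx
    rw [lbVisitB]
    by_cases hb : PySem.Set.contains σ.1 b = true
    · rw [if_pos hb]; exact hx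
    · rw [if_neg hb]
      by_cases hh : b = hdr
      · rw [if_pos hh]
        exact (PySem.Set.mem_add σ.1 b x).mpr (Or.inl hx)
      · rw [if_neg hh]
        have hfold : ∀ (l : List String) (σ₀ : PySem.Set String × PySem.Set String),
            x ∈ σ₀.1 → x ∈ (l.foldl (fun σ p => lbVisitB d hdr f p σ) σ₀).1 := by
          intro l
          induction l with
          | nil => intro σ₀ h0; exact h0
          | cons p l ihl => intro σ₀ h0; exact ihl _ (ih p σ₀ x h0)
        exact hfold _ _ ((PySem.Set.mem_add σ.1 b x).mpr (Or.inl hx))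

theorem lbB_foldl_mono (d : PySem.Dict String (List String)) (hdr : String) (f : Nat) :
    ∀ (l : List String) (σ : PySem.Set String × PySem.Set String) (x : String),
      x ∈ σ.1 → x ∈ (l.foldl (fun σ p => lbVisitB d hdr f p σ) σ).1 := by
  intro l
  induction l with
  | nil => intro σ x hx; exact hx
  | cons p l ihl => intro σ x hx; exact ihl _ x (lbB_mono d hdr f p σ x hx)

theorem lbB_filter (d : PySem.Dict String (List String)) (hdr : String) (f : Nat)
    (v₀ : PySem.Set String) :
    ∀ (l : List String) (σ : PySem.Set String × PySem.Set String),
      (∀ x ∈ v₀, x ∈ σ.1) →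
      (l.filter (fun p => !PySem.Set.contains v₀ p)).foldl
          (fun σ p => lbVisitB d hdr f p σ) σ
        = l.foldl (fun σ p => lbVisitB d hdr f p σ) σ := by
  intro l
  induction l with
  | nil => intro σ _; rfl
  | cons p l ih =>
    intro σ hσ
    rw [List.filter_cons]
    by_cases hc : PySem.Set.contains v₀ p = true
    · rw [if_neg (by rw [hc]; simp)]
      rw [List.foldl_cons, lbB_skip d hdr f p σ (hσ p ((PySem.Set.contains_iff v₀ p).mp hc))]
      exact ih σ hσ
    · rw [if_pos (by rw [Bool.not_eq_true] at hc; rw [hc]; rfl)]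
      rw [List.foldl_cons, List.foldl_cons]
      exact ih _ (fun x hx => lbB_mono d hdr f p σ x (hσ x hx))

-- visited only grows: bigger visited, smaller remaining measure
theorem lb_card_antimono (T : Finset String) (v w : PySem.Set String)
    (hvw : ∀ x ∈ v, x ∈ w) :
    (T \ w.toFinset).card ≤ (T \ v.toFinset).card := by
  apply Finset.card_le_card
  intro x hx
  simp only [Finset.mem_sdiff, List.mem_toFinset] at hx ⊢
  exact ⟨hx.1, fun hxv => hx.2 (hvw x hxv)⟩

-- the while loop splits over a stack append
theorem lb_append (d : PySem.Dict String (List String)) (hdr : String) :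
    ∀ (n : Nat) (s₁ : List String) (v r : PySem.Set String),
      (((PySem.Dict.values d).flatten ++ s₁).toFinset \ v.toFinset).card ≤ n →
      ∀ (s₂ : List String),
        lbCoreA d hdr (s₁ ++ s₂) v r
          = lbCoreA d hdr s₂ (lbCoreA d hdr s₁ v r).1 (lbCoreA d hdr s₁ v r).2 := by
  intro n
  induction n with
  | zero =>
    intro s₁
    induction s₁ with
    | nil => intro v r _ s₂; rw [lbA_nil]; rfl
    | cons c rest ihs =>
      intro v r hcard s₂
      by_cases hv : c ∈ v
      · rw [List.cons_append, lbA_skip d hdr c _ v r hv, lbA_skip d hdr c rest v r hv]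
        exact ihs v r (le_trans (Finset.card_le_card
          (lb_card_sub (PySem.Dict.values d).flatten rest rest c v (fun x hx => Or.inr hx))) hcard) s₂
      · exfalso
        have : c ∈ (((PySem.Dict.values d).flatten ++ (c :: rest)).toFinset \ v.toFinset) := by
          simp only [Finset.mem_sdiff, List.mem_toFinset, List.mem_append, List.mem_cons]
          exact ⟨Or.inr (Or.inl trivial), hv⟩
        have := Finset.card_pos.mpr ⟨c, this⟩
        omega
  | succ n ihn =>
    intro s₁
    induction s₁ with
    | nil => intro v r _ s₂; rw [lbA_nil]; rfl
    | cons c rest ihs =>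
      intro v r hcard s₂
      by_cases hv : c ∈ v
      · rw [List.cons_append, lbA_skip d hdr c _ v r hv, lbA_skip d hdr c rest v r hv]
        exact ihs v r (le_trans (Finset.card_le_card
          (lb_card_sub (PySem.Dict.values d).flatten rest rest c v (fun x hx => Or.inr hx))) hcard) s₂
      · by_cases hh : c = hdr
        · subst hh
          rw [List.cons_append, lbA_header d c _ v r hv, lbA_header d c rest v r hv]
          have hlt := lb_card_lt (PySem.Dict.values d).flatten rest rest c v hv (fun x hx => Or.inr hx)
          exact ihn rest (PySem.Set.add v c) r (by omega) s₂
        · rw [List.cons_append, lbA_step d hdr c _ v r hv hh, lbA_step d hdr c rest v r hv hh]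
          rw [← List.append_assoc]
          have hmem : ∀ x ∈ ((PySem.Dict.getD d c []).filter
              (fun p => !PySem.Set.contains (PySem.Set.add v c) p)).reverse ++ rest,
              x ∈ (PySem.Dict.values d).flatten ∨ x ∈ rest := by
            intro x hx
            rcases List.mem_append.mp hx with h | h
            · exact Or.inl (lb_mem_getD (List.mem_of_mem_filter (List.mem_reverse.mp h)))
            · exact Or.inr h
          have hlt := lb_card_lt (PySem.Dict.values d).flatten _ rest c v hv hmem
          exact ihn _ (PySem.Set.add v c) (PySem.Set.add (PySem.Set.add r c) hdr) (by omega) s₂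

-- main simulation: the while loop IS the recursive visit folded over the stack
theorem lb_main (d : PySem.Dict String (List String)) (hdr : String) :
    ∀ (n f : Nat) (s : List String) (v r : PySem.Set String),
      (((PySem.Dict.values d).flatten ++ s).toFinset \ v.toFinset).card ≤ n →
      (((PySem.Dict.values d).flatten ++ s).toFinset \ v.toFinset).card < f →
      lbCoreA d hdr s v r = s.foldl (fun σ p => lbVisitB d hdr f p σ) (v, r) := by
  intro n
  induction n with
  | zero =>
    intro f s
    induction s with
    | nil => intro v r _ _; rw [lbA_nil]; rfl
    | cons c rest ihs =>
      intro v r hcard hf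
      by_cases hv : c ∈ v
      · rw [lbA_skip d hdr c rest v r hv, List.foldl_cons, lbB_skip d hdr f c (v, r) hv]
        have hle := Finset.card_le_card
          (lb_card_sub (PySem.Dict.values d).flatten rest rest c v (fun x hx => Or.inr hx))
        exact ihs v r (by omega) (by omega)
      · exfalso
        have : c ∈ (((PySem.Dict.values d).flatten ++ (c :: rest)).toFinset \ v.toFinset) := by
          simp only [Finset.mem_sdiff, List.mem_toFinset, List.mem_append, List.mem_cons]
          exact ⟨Or.inr (Or.inl trivial), hv⟩
        have := Finset.card_pos.mpr ⟨c, this⟩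
        omega
  | succ n ihn =>
    intro f s
    induction s with
    | nil => intro v r _ _; rw [lbA_nil]; rfl
    | cons c rest ihs =>
      intro v r hcard hf
      by_cases hv : c ∈ v
      · rw [lbA_skip d hdr c rest v r hv, List.foldl_cons, lbB_skip d hdr f c (v, r) hv]
        have hle := Finset.card_le_card
          (lb_card_sub (PySem.Dict.values d).flatten rest rest c v (fun x hx => Or.inr hx))
        exact ihs v r (by omega) (by omega)
      · have hcpos : 0 < (((PySem.Dict.values d).flatten ++ (c :: rest)).toFinset \ v.toFinset).card := by
          apply Finset.card_pos.mpr
          refine ⟨c, ?_⟩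
          simp only [Finset.mem_sdiff, List.mem_toFinset, List.mem_append, List.mem_cons]
          exact ⟨Or.inr (Or.inl trivial), hv⟩
        obtain ⟨f', rfl⟩ : ∃ f', f = f' + 1 := ⟨f - 1, by omega⟩
        by_cases hh : c = hdr
        · subst hh
          rw [lbA_header d c rest v r hv, List.foldl_cons]
          rw [lbVisitB, if_neg (fun ht => hv ((PySem.Set.contains_iff v c).mp ht)), if_pos rfl]
          have hlt := lb_card_lt (PySem.Dict.values d).flatten rest rest c v hv (fun x hx => Or.inr hx)
          exact ihn (f' + 1) rest (PySem.Set.add v c) r (by omega) (by omega)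
        · -- processing step
          rw [lbA_step d hdr c rest v r hv hh]
          have hmem : ∀ x ∈ ((PySem.Dict.getD d c []).filter
              (fun p => !PySem.Set.contains (PySem.Set.add v c) p)).reverse ++ rest,
              x ∈ (PySem.Dict.values d).flatten ∨ x ∈ rest := by
            intro x hx
            rcases List.mem_append.mp hx with h | h
            · exact Or.inl (lb_mem_getD (List.mem_of_mem_filter (List.mem_reverse.mp h)))
            · exact Or.inr h
          have hlt := lb_card_lt (PySem.Dict.values d).flatten _ rest c v hv hmem
          -- the pushed prefix strictly shrinks the measure
          have hle1 := lb_card_lt (PySem.Dict.values d).flatten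
            (((PySem.Dict.getD d c []).filter
              (fun p => !PySem.Set.contains (PySem.Set.add v c) p)).reverse) rest c v hv
            (fun x hx => Or.inl (lb_mem_getD (List.mem_of_mem_filter (List.mem_reverse.mp hx))))
          -- split the pushed prefix off the stack
          rw [lb_append d hdr n _ (PySem.Set.add v c) _ (by omega) rest]
          have hvisit : lbCoreA d hdr
              (((PySem.Dict.getD d c []).filter
                (fun p => !PySem.Set.contains (PySem.Set.add v c) p)).reverse)
              (PySem.Set.add v c) (PySem.Set.add (PySem.Set.add r c) hdr)
              = lbVisitB d hdr (f' + 1) c (v, r) := by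
            rw [ihn f' _ (PySem.Set.add v c) (PySem.Set.add (PySem.Set.add r c) hdr)
              (by omega) (by omega)]
            rw [← List.filter_reverse]
            rw [lbB_filter d hdr f' (PySem.Set.add v c) _ _
              (fun x hx => hx)]
            rw [lbVisitB, if_neg (fun ht => hv ((PySem.Set.contains_iff v c).mp ht)), if_neg hh]
          rw [hvisit, List.foldl_cons]
          -- finish with the rest of the stack
          have hsub : ∀ x ∈ PySem.Set.add v c, x ∈ (lbVisitB d hdr (f' + 1) c (v, r)).1 := by
            intro x hx
            rw [lbVisitB, if_neg (fun ht => hv ((PySem.Set.contains_iff v c).mp ht)), if_neg hh]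
            exact lbB_foldl_mono d hdr f' _ _ x hx
          have hle2 := lb_card_antimono
            (((PySem.Dict.values d).flatten ++ rest).toFinset)
            (PySem.Set.add v c) (lbVisitB d hdr (f' + 1) c (v, r)).1 hsub
          have hlt2 := lb_card_lt (PySem.Dict.values d).flatten rest rest c v hv (fun x hx => Or.inr hx)
          have := ihn (f' + 1) rest (lbVisitB d hdr (f' + 1) c (v, r)).1
            (lbVisitB d hdr (f' + 1) c (v, r)).2 (by omega) (by omega)
          rw [this, Prod.mk.eta]

-- ===== VERDICT (by name: the statement is the Claim_ definition above) =====
theorem loop_blocks_by_backEdge_spec : Claim_equal_loop_blocks_by_backEdge := by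
  intro preds be hdr _
  unfold Spec_loop_blocks_by_backEdge loop_blocks_by_backEdge loop_blocks_by_backEdge_alt
  have hbound : ((((PySem.Dict.values (PySem.Dict.ofList preds)).flatten ++ [be]).toFinset \
      (PySem.Set.empty : PySem.Set String).toFinset).card)
      < (PySem.Dict.values (PySem.Dict.ofList preds)).flatten.length + 2 := by
    have h1 : ((((PySem.Dict.values (PySem.Dict.ofList preds)).flatten ++ [be]).toFinset \
        (PySem.Set.empty : PySem.Set String).toFinset).card)
        ≤ ((PySem.Dict.values (PySem.Dict.ofList preds)).flatten ++ [be]).toFinset.card :=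
      Finset.card_le_card (Finset.sdiff_subset)
    have h2 := List.toFinset_card_le ((PySem.Dict.values (PySem.Dict.ofList preds)).flatten ++ [be])
    have h3 : ((PySem.Dict.values (PySem.Dict.ofList preds)).flatten ++ [be]).length
        = (PySem.Dict.values (PySem.Dict.ofList preds)).flatten.length + 1 := by simp
    omega
  rw [lb_main (PySem.Dict.ofList preds) hdr _
    ((PySem.Dict.values (PySem.Dict.ofList preds)).flatten.length + 2)
    [be] PySem.Set.empty PySem.Set.empty (le_refl _) hbound]
  rfl
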